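-- pv_equiv track=rewrite | github.com/ssamko0911/PyWars | tasks/task042.py | solve
-- ===== SOURCE A (Python) =====
-- def update_longest(temp_counter: int, longest_vowel_sequence: int) -> int:
--     if temp_counter > longest_vowel_sequence:
--         return temp_counter
--
--     return longest_vowel_sequence
--
-- def solve(word: str) -> int:
--     longest_vowel_sequence: int = 0
--     temp_counter: int = 0
--
--     for letter in word:
--         if letter in 'aeiou':
--             is_vowel = True
--         else:
--             is_vowel = False
--
--         if is_vowel:
--             temp_counter += 1
--         else:
--             longest_vowel_sequence = update_longest(temp_counter, longest_vowel_sequence)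
--             temp_counter = 0
--
--     if temp_counter != 0:
--         longest_vowel_sequence = update_longest(temp_counter, longest_vowel_sequence)
--
--     return longest_vowel_sequence
-- ===== SOURCE B (Python) =====
-- def solve(word: str) -> int:
--     # Replace every non-vowel by a space, split into maximal vowel groups,
--     # and take the longest group (0 if there is none).
--     masked = ''.join(c if c in 'aeiou' else ' ' for c in word)
--     return max(map(len, masked.split()), default=0)
-- ===== Notes on version B (the rewrite author's own statement) =====
-- stated objective: idiomatic
-- what changed: B masks non-vowels to spaces and takes the maximum length over str.split() groups, instead of A's running-counter state machine with a max-update helper.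
import Mathlib
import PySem

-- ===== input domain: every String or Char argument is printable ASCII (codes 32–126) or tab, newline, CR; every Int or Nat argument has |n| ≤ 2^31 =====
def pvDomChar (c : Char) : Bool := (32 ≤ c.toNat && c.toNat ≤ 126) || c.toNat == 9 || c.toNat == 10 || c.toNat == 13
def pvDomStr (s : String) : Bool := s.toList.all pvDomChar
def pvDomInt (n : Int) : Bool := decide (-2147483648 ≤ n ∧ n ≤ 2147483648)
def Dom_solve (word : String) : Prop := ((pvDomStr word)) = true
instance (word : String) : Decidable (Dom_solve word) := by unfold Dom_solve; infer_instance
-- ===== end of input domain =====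

-- B masks non-vowels to spaces and takes the max length over split() groups (idiomatic rewrite of A's running-counter state machine).


-- ===== PORT A =====
def updateLongest (tempCounter longest : Int) : Int :=
  if tempCounter > longest then tempCounter else longest

-- one loop step: state = (longest_vowel_sequence, temp_counter)
def solveStep (s : Int × Int) (letter : Char) : Int × Int :=
  if ['a', 'e', 'i', 'o', 'u'].contains letter then (s.1, s.2 + 1)
  else (updateLongest s.2 s.1, 0)

def solve (word : String) : Int :=
  let p := word.toList.foldl solveStep (0, 0)
  if p.2 ≠ 0 then updateLongest p.2 p.1 else p.1

-- ===== PORT B =====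
def solve_alt (word : String) : Int :=
  let masked : List Char :=
    word.toList.map (fun c => if ['a', 'e', 'i', 'o', 'u'].contains c then c else ' ')
  let groups : List (List Char) := PySem.Chars.split₀ masked
  PySem.List.maxD (groups.map (fun g => (g.length : Int))) (fun x => x) 0

-- ===== PRECONDITION & SPEC =====
def Spec_solve (word : String) (out : Int) : Prop := out = solve_alt word
instance (word : String) (out : Int) : Decidable (Spec_solve word out) := by unfold Spec_solve; infer_instance

-- ===== CLAIM (what is proved, stated in full; the proofs are below) =====
def Claim_equal_solve : Prop := ∀ (word : String), Dom_solve word → Spec_solve word (solve word)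

-- ===== LEMMAS AND PROOFS =====

-- common specification: longest run of vowels, Nat version
def RN : List Char → Nat → Nat
  | [], t => t
  | c :: cs, t =>
      if ['a', 'e', 'i', 'o', 'u'].contains c then RN cs (t + 1)
      else max t (RN cs 0)

-- Int version, matching A's arithmetic
def RI : List Char → Int → Int
  | [], t => t
  | c :: cs, t =>
      if ['a', 'e', 'i', 'o', 'u'].contains c then RI cs (t + 1)
      else max t (RI cs 0)

-- A's trailing update, as a function of the final loop state
def finalA (p : Int × Int) : Int := if p.2 ≠ 0 then updateLongest p.2 p.1 else p.1

lemma RI_cast (cs : List Char) (n : Nat) : RI cs (n : Int) = (RN cs n : Int) := by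
  induction cs generalizing n with
  | nil => simp [RI, RN]
  | cons c cs ih =>
      simp only [RI, RN]
      split_ifs with h
      · exact_mod_cast ih (n + 1)
      · have h0 : RI cs 0 = ((RN cs 0 : Nat) : Int) := by exact_mod_cast ih 0
        rw [h0, ← Nat.cast_max]

lemma updateLongest_eq_max (t L : Int) : updateLongest t L = max L t := by
  unfold updateLongest
  split_ifs with h <;> omega

lemma loopA (cs : List Char) : ∀ (L t : Int), 0 ≤ L → 0 ≤ t →
    finalA (cs.foldl solveStep (L, t)) = max L (RI cs t) := by
  induction cs with
  | nil =>
      intro L t hL ht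
      simp only [List.foldl_nil, RI, finalA, updateLongest_eq_max]
      split_ifs with h <;> omega
  | cons c cs ih =>
      intro L t hL ht
      simp only [List.foldl_cons, RI]
      by_cases h : ['a', 'e', 'i', 'o', 'u'].contains c = true
      · simp only [solveStep, h, if_true]
        rw [ih L (t + 1) hL (by omega)]
      · simp only [solveStep, h, Bool.false_eq_true, if_false]
        rw [ih (updateLongest t L) 0 (by rw [updateLongest_eq_max]; omega) le_rfl]
        rw [updateLongest_eq_max, max_assoc]

lemma vowel_not_space (c : Char) (h : ['a', 'e', 'i', 'o', 'u'].contains c = true) :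
    PySem.Chars.isspace c = false := by
  have hm : c ∈ ['a', 'e', 'i', 'o', 'u'] := by simpa using h
  fin_cases hm <;> decide

-- one-step unfoldings of the split₀ scanner
lemma go_nil (cur : List Char) (acc : List (List Char)) :
    PySem.Chars.split₀.go [] cur acc
      = if cur.isEmpty then acc.reverse else (cur.reverse :: acc).reverse := by
  simp [PySem.Chars.split₀.go]

lemma go_cons (c : Char) (rest cur : List Char) (acc : List (List Char)) :
    PySem.Chars.split₀.go (c :: rest) cur acc
      = if PySem.Chars.isspace c then
          (if cur.isEmpty then PySem.Chars.split₀.go rest [] acc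
           else PySem.Chars.split₀.go rest [] (cur.reverse :: acc))
        else PySem.Chars.split₀.go rest (c :: cur) acc := by
  conv_lhs => rw [PySem.Chars.split₀.go]

-- fold-max over lengths of split groups, generalized over the scanner state
lemma loopB (cs : List Char) : ∀ (cur : List Char) (acc : List (List Char)),
    ((PySem.Chars.split₀.go
        (cs.map (fun c => if ['a', 'e', 'i', 'o', 'u'].contains c then c else ' '))
        cur acc).map List.length).foldl max 0
      = max ((acc.reverse.map List.length).foldl max 0) (RN cs cur.length) := by
  induction cs with
  | nil =>
      intro cur acc
      simp only [List.map_nil, go_nil, RN]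
      by_cases h : cur.isEmpty = true
      · have hcur : cur = [] := by simpa [List.isEmpty_iff] using h
        simp [hcur]
      · simp only [h, Bool.false_eq_true, if_false]
        simp [List.foldl_append]
  | cons c cs ih =>
      intro cur acc
      simp only [List.map_cons, RN]
      by_cases h : ['a', 'e', 'i', 'o', 'u'].contains c = true
      · simp only [h, if_true, go_cons, vowel_not_space c h, Bool.false_eq_true, if_false]
        rw [ih (c :: cur) acc]
        simp
      · simp only [h, Bool.false_eq_true, if_false, go_cons]
        have hsp : PySem.Chars.isspace ' ' = true := by decide
        simp only [hsp, if_true]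
        by_cases hc : cur.isEmpty = true
        · have hcur : cur = [] := by simpa [List.isEmpty_iff] using hc
          rw [if_pos hc, ih [] acc]
          simp [hcur]
        · rw [if_neg (by simpa using hc), ih [] (cur.reverse :: acc)]
          simp [List.foldl_append, max_assoc]

lemma cast_foldl_max (t : List (List Char)) : ∀ (a : Nat),
    (t.map (fun g => (g.length : Int))).foldl max (a : Int)
      = (((t.map List.length).foldl max a : Nat) : Int) := by
  induction t with
  | nil => intro a; simp
  | cons x t ih =>
      intro a
      simp only [List.map_cons, List.foldl_cons]
      rw [← Nat.cast_max, ih]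

lemma maxD_lengths (gs : List (List Char)) :
    PySem.List.maxD (gs.map (fun g => (g.length : Int))) (fun x => x) 0
      = (((gs.map List.length).foldl max 0 : Nat) : Int) := by
  cases gs with
  | nil => simp [PySem.List.maxD, PySem.List.max?]
  | cons g t =>
      simp only [List.map_cons, PySem.List.maxD]
      rw [PySem.List.max?_id_cons]
      simp only [Option.getD_some, List.foldl_cons, cast_foldl_max]
      simp

lemma RI_nonneg (cs : List Char) : ∀ (t : Int), 0 ≤ t → 0 ≤ RI cs t := by
  induction cs with
  | nil => intro t ht; simpa [RI] using ht
  | cons c cs ih =>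
      intro t ht
      simp only [RI]
      split_ifs with h
      · exact ih (t + 1) (by omega)
      · have := ih 0 le_rfl
        omega

-- ===== VERDICT (by name: the statement is the Claim_ definition above) =====
theorem solve_spec : Claim_equal_solve := by
  intro word _
  unfold Spec_solve solve solve_alt PySem.Chars.split₀
  rw [maxD_lengths, loopB word.toList [] []]
  have h := loopA word.toList 0 0 le_rfl le_rfl
  simp only [finalA] at h
  rw [h]
  have h0 : RI word.toList 0 = ((RN word.toList 0 : Nat) : Int) := by
    exact_mod_cast RI_cast word.toList 0
  have hn : 0 ≤ RI word.toList 0 := RI_nonneg word.toList 0 le_rfl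
  simp only [List.reverse_nil, List.map_nil, List.foldl_nil, List.length_nil]
  omega
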